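-- pv_equiv track=rewrite | github.com/equinor/NRAP-Open-IAM | source/openiam/visualize/sensitivity_analysis.py | get_comp_title_str
-- ===== SOURCE A (Python) =====
-- def get_comp_title_str(comp_names):
--     """
--     Get string to show the component names in a figure title. Note that component
--     names are formatted like 'SimpleReservoir1_000', where 'SimpleReservoir1'
--     is specified by the user and '_000' designates the location index as 0.
--
--     :param comp_names: list of component names
--     :type comp_name: list
--
--     """
--     if len(set(comp_names)) > 2:
--         comp_title_str = ''
--         used_comp_names = []
--         for cm_name in comp_names:
--             if cm_name not in used_comp_names:
--                 comp_title_str += cm_name + ', '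
--                 used_comp_names.append(cm_name)
--                 last_added = cm_name
--
--         # remove last comma and add ' and ' before the last comp_name
--         comp_title_str = comp_title_str[
--             0:(-2 - (len(last_added)))] + 'and ' + comp_title_str[
--                 (-2 - (len(last_added))):-2]
--
--         comp_title_str += ' Sensitivities'
--
--     elif len(set(comp_names)) == 2:
--         comp_title_str = ''
--         used_comp_names = []
--         for cm_name in comp_names:
--             if cm_name not in used_comp_names:
--                 if comp_title_str == '':
--                     comp_title_str += cm_name + ' and '
--                 else:
--                     comp_title_str += cm_name
--                 used_comp_names.append(cm_name)
--
--         comp_title_str += ' Sensitivities'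
--
--     elif len(set(comp_names)) == 1:
--         comp_title_str = comp_names[0] + ' Sensitivity'
--
--     return comp_title_str
-- ===== SOURCE B (Python) =====
-- def get_comp_title_str(comp_names):
--     uniques = list(dict.fromkeys(comp_names))
--     if len(uniques) > 2:
--         comp_title_str = ', '.join(uniques[:-1]) + ', and ' + uniques[-1] + ' Sensitivities'
--     elif len(uniques) == 2:
--         comp_title_str = uniques[0] + ' and ' + uniques[1] + ' Sensitivities'
--     elif len(uniques) == 1:
--         comp_title_str = comp_names[0] + ' Sensitivity'
--     return comp_title_str
-- ===== Notes on version B (the rewrite author's own statement) =====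
-- stated objective: simpler
-- what changed: Replaces A's accumulate-then-negative-slice surgery (build 'x, y, z, ', then cut around the last name with computed negative slice indices) by computing the first-occurrence unique list once with dict.fromkeys and assembling each title directly with join/indexing; the membership-scan loop and the string slicing disappear.
import Mathlib
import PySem

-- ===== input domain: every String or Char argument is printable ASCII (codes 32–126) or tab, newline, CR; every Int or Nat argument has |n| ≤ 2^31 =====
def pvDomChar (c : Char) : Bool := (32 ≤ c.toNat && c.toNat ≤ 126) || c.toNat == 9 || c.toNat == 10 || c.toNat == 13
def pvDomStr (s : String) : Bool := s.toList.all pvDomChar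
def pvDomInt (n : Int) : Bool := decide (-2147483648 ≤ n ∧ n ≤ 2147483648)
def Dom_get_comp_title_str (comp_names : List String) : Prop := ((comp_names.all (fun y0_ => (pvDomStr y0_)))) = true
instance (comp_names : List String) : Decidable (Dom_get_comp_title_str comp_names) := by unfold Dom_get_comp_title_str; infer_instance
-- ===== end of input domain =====

-- B builds the title from the first-occurrence unique list (dict.fromkeys) with join/indexing
-- instead of A's membership-scan loop plus negative-slice string surgery; objective: simpler.

-- ===== PORT A =====
-- loop body of the `> 2` branch: state (comp_title_str, used_comp_names, last_added)
-- (Python's last_added starts unbound; it is always assigned before use in this branch,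
--  so the [] initial value is unreachable)
def stepA (st : List Char × List String × List Char) (cm : String) :
    List Char × List String × List Char :=
  if st.2.1.contains cm then st
  else (st.1 ++ cm.toList ++ [',', ' '], st.2.1 ++ [cm], cm.toList)

-- loop body of the `== 2` branch: state (comp_title_str, used_comp_names)
def stepA2 (st : List Char × List String) (cm : String) : List Char × List String :=
  if st.2.contains cm then st
  else if st.1 = [] then (st.1 ++ cm.toList ++ (" and ").toList, st.2 ++ [cm])
  else (st.1 ++ cm.toList, st.2 ++ [cm])

def get_comp_title_str (comp_names : List String) : String :=
  if PySem.Set.len (PySem.Set.ofList comp_names) > 2 then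
    let st := comp_names.foldl stepA ([], [], [])
    let t := PySem.List.slice st.1 (some 0) (some (-2 - (st.2.2.length : Int)))
             ++ ("and ").toList
             ++ PySem.List.slice st.1 (some (-2 - (st.2.2.length : Int))) (some (-2))
    String.ofList (t ++ (" Sensitivities").toList)
  else if PySem.Set.len (PySem.Set.ofList comp_names) = 2 then
    let st := comp_names.foldl stepA2 ([], [])
    String.ofList (st.1 ++ (" Sensitivities").toList)
  else if PySem.Set.len (PySem.Set.ofList comp_names) = 1 then
    PySem.List.pyGetD comp_names 0 "" ++ " Sensitivity"
  else
    ""  -- Python raises UnboundLocalError here (empty comp_names); excluded by Pre_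

-- ===== PORT B =====
def get_comp_title_str_alt (comp_names : List String) : String :=
  let uniques := PySem.List.dedup comp_names
  if uniques.length > 2 then
    PySem.Str.join ", " (PySem.List.slice uniques none (some (-1)))
      ++ ", and " ++ PySem.List.pyGetD uniques (-1) "" ++ " Sensitivities"
  else if uniques.length = 2 then
    PySem.List.pyGetD uniques 0 "" ++ " and " ++ PySem.List.pyGetD uniques 1 "" ++ " Sensitivities"
  else if uniques.length = 1 then
    PySem.List.pyGetD comp_names 0 "" ++ " Sensitivity"
  else
    ""  -- Python raises UnboundLocalError here (empty comp_names); excluded by Pre_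

-- ===== PRECONDITION & SPEC =====
-- Pre_ excludes only the empty list, on which the Python A (and B) raise UnboundLocalError.
def Pre_get_comp_title_str (comp_names : List String) : Prop := comp_names.length ≠ 0
instance (comp_names : List String) : Decidable (Pre_get_comp_title_str comp_names) := by
  unfold Pre_get_comp_title_str; infer_instance

def pvWitness_get_comp_title_str : List String := ["SimpleReservoir1_000"]

def Spec_get_comp_title_str (comp_names : List String) (out : String) : Prop := out = get_comp_title_str_alt comp_names
instance (comp_names : List String) (out : String) : Decidable (Spec_get_comp_title_str comp_names out) := by unfold Spec_get_comp_title_str; infer_instance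

-- ===== CLAIM (what is proved, stated in full; the proofs are below) =====
def Claim_equal_get_comp_title_str : Prop := ∀ (comp_names : List String), Dom_get_comp_title_str comp_names → Pre_get_comp_title_str comp_names → Spec_get_comp_title_str comp_names (get_comp_title_str comp_names)

-- ===== LEMMAS AND PROOFS =====

-- the list of elements of xs that A's dedup-loops append, given already `used` names
def newU (used : List String) : List String → List String
  | [] => []
  | x :: r => if used.contains x then newU used r else x :: newU (used ++ [x]) r

theorem foldl_add_eq_newU (xs used) :
    List.foldl PySem.Set.add used xs = used ++ newU used xs := by
  induction xs generalizing used with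
  | nil => simp [newU]
  | cons x r ih =>
      by_cases h : x ∈ used
      · simp [PySem.Set.add, newU, h, ih]
      · simp [PySem.Set.add, newU, h, ih]

theorem dedup_eq_newU (xs : List String) : PySem.List.dedup xs = newU [] xs := by
  simp [PySem.List.dedup_eq_ofList, PySem.Set.ofList, PySem.Set.empty, foldl_add_eq_newU]

theorem getLastD_map_toList (l : List String) (x : String) (d : List Char) :
    ((l.getLast?.getD x).toList) = ((x.toList :: l.map String.toList).getLast?.getD d) := by
  induction l generalizing x d with
  | nil => simp
  | cons y ys ih =>
      rw [List.getLast?_cons, Option.getD_some, List.map_cons, List.getLast?_cons_cons]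
      exact ih y d

theorem loopA_eq (xs : List String) (t : List Char) (used : List String) (last : List Char) :
    xs.foldl stepA (t, used, last) =
      (t ++ (newU used xs).flatMap (fun s => s.toList ++ [',', ' ']),
       used ++ newU used xs,
       ((newU used xs).map String.toList).getLastD last) := by
  induction xs generalizing t used last with
  | nil => simp [newU]
  | cons x r ih =>
      by_cases h : x ∈ used
      · simp [stepA, newU, h, ih]
      · simp [stepA, newU, h, ih]
        exact getLastD_map_toList _ x last

theorem loopB_ne (xs : List String) (t : List Char) (used : List String) (ht : t ≠ []) :
    xs.foldl stepA2 (t, used) =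
      (t ++ (newU used xs).flatMap String.toList, used ++ newU used xs) := by
  induction xs generalizing t used with
  | nil => simp [newU]
  | cons x r ih =>
      by_cases h : x ∈ used
      · simp only [List.foldl_cons, stepA2]
        rw [if_pos (by simpa using h)]
        simp [newU, h, ih t used ht]
      · have ht' : t ++ x.toList ≠ [] := by simp [ht]
        simp only [List.foldl_cons, stepA2]
        rw [if_neg (by simpa using h), if_neg ht]
        simp [newU, h, ih _ _ ht']

theorem loopB_nil (xs : List String) (used : List String) :
    xs.foldl stepA2 ([], used) =
      (match newU used xs with
       | [] => ([], used)
       | a :: rest => (a.toList ++ [' ', 'a', 'n', 'd', ' '] ++ rest.flatMap String.toList,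
                       used ++ a :: rest)) := by
  induction xs generalizing used with
  | nil => simp [newU]
  | cons x r ih =>
      by_cases h : x ∈ used
      · simp only [List.foldl_cons, stepA2]
        rw [if_pos (by simpa using h)]
        simp [newU, h, ih]
      · simp only [List.foldl_cons, stepA2]
        rw [if_neg (by simpa using h)]
        simp only [if_true, List.nil_append]
        rw [loopB_ne r (x.toList ++ (" and ").toList) (used ++ [x]) (by simp)]
        simp [newU, h]

theorem join_flat (l : List (List Char)) (hl : l ≠ []) :
    PySem.Chars.join [',', ' '] l ++ [',', ' '] =
      l.flatMap (fun s => s ++ [',', ' ']) := by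
  induction l with
  | nil => simp at hl
  | cons p rest ih =>
      cases rest with
      | nil => simp [PySem.Chars.join_singleton]
      | cons q rest' =>
          rw [PySem.Chars.join_cons_cons]
          simp only [List.flatMap_cons, List.append_assoc]
          rw [ih (by simp)]
          simp

-- ===== VERDICT (by name: the statement is the Claim_ definition above) =====
theorem get_comp_title_str_spec : Claim_equal_get_comp_title_str := by
  intro comp_names _ hpre
  unfold Spec_get_comp_title_str get_comp_title_str get_comp_title_str_alt
  have hlen : PySem.Set.len (PySem.Set.ofList comp_names) =
      ((PySem.List.dedup comp_names).length : Int) := by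
    simp [PySem.Set.len, PySem.List.dedup_eq_ofList]
  set u := PySem.List.dedup comp_names with hu
  have hnu : newU [] comp_names = u := (dedup_eq_newU comp_names).symm
  rw [hlen]
  by_cases h3 : u.length > 2
  · -- > 2 branch
    rw [if_pos (by exact_mod_cast h3), if_pos h3]
    rw [loopA_eq, hnu]
    -- split u as init ++ [a]
    have hune : u ≠ [] := by intro h; rw [h] at h3; simp at h3
    obtain ⟨I, a, hIa⟩ : ∃ I a, u = I ++ [a] :=
      ⟨u.dropLast, u.getLast hune, (List.dropLast_append_getLast hune).symm⟩
    have hIne : I ≠ [] := by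
      intro h; rw [h] at hIa; rw [hIa] at h3; simp at h3
    rw [hIa]
    have hflat : (I ++ [a]).flatMap (fun s => s.toList ++ [',', ' ']) =
        I.flatMap (fun s => s.toList ++ [',', ' ']) ++ a.toList ++ [',', ' '] := by
      simp
    have hlast : (((I ++ [a]).map String.toList).getLastD []) = a.toList := by
      simp
    simp only [hflat, hlast, List.nil_append]
    set P := I.flatMap (fun s => s.toList ++ [',', ' ']) with hP
    have hlenT : (P ++ a.toList ++ [',', ' ']).length = P.length + a.toList.length + 2 := by
      simp only [List.length_append, List.length_cons, List.length_nil]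
      try omega
    -- first slice = P
    have hidx : (-2 - (a.toList.length : Int)) = -((a.toList.length + 2 : Nat) : Int) := by
      push_cast; ring
    have hs1 : PySem.List.slice (P ++ a.toList ++ [',', ' ']) (some 0)
        (some (-2 - (a.toList.length : Int))) = P := by
      rw [hidx, PySem.List.slice_zero_start,
          PySem.List.slice_to_neg_natCast _ _ (by omega)]
      rw [hlenT]
      have : P.length + a.toList.length + 2 - (a.toList.length + 2) = P.length := by omega
      rw [this]
      rw [List.append_assoc, List.take_left' rfl]
    -- second slice = a.toList
    have hs2 : PySem.List.slice (P ++ a.toList ++ [',', ' '])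
        (some (-2 - (a.toList.length : Int))) (some (-2)) = a.toList := by
      rw [hidx]
      simp only [PySem.List.slice]
      rw [show ((-2 : Int)) = -((2 : Nat) : Int) by norm_num]
      rw [PySem.List.clampIdx_neg_natCast _ _ (by omega),
          PySem.List.clampIdx_neg_natCast _ _ (by omega)]
      rw [hlenT]
      have h1 : P.length + a.toList.length + 2 - (a.toList.length + 2) = P.length := by omega
      have h2 : P.length + a.toList.length + 2 - 2 - P.length = a.toList.length := by omega
      rw [h1, h2]
      rw [List.append_assoc, List.drop_left' rfl, List.take_left' rfl]
    rw [hs1, hs2]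
    -- B side
    have hsliceB : PySem.List.slice (I ++ [a]) none (some (-1)) = I := by
      rw [PySem.List.slice_to_neg_one]; simp
    have hgetB : PySem.List.pyGetD (I ++ [a]) (-1) "" = a := by
      rw [PySem.List.pyGetD_neg_one _ _ (by simp)]; simp
    rw [hsliceB, hgetB]
    apply String.toList_inj.mp
    simp only [String.toList_append, String.toList_ofList, PySem.Str.toList_join]
    have hjoin : PySem.Chars.join [',', ' '] (I.map String.toList) ++ [',', ' '] =
        (I.map String.toList).flatMap (fun s => s ++ [',', ' ']) :=
      join_flat _ (by simp [hIne])
    have hPm : P = (I.map String.toList).flatMap (fun s => s ++ [',', ' ']) := by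
      rw [hP, List.flatMap_map]
    have hand : (", and " : String).toList = [',', ' '] ++ ("and " : String).toList := by decide
    rw [hPm, ← hjoin, hand]
    simp
  · rw [if_neg (by exact_mod_cast h3), if_neg h3]
    by_cases h2 : u.length = 2
    · -- == 2 branch
      rw [if_pos (by exact_mod_cast h2), if_pos h2]
      obtain ⟨a, b, hab⟩ := List.length_eq_two.mp h2
      rw [loopB_nil, hnu, hab]
      apply String.toList_inj.mp
      simp only [String.toList_append, String.toList_ofList]
      have g0 : PySem.List.pyGetD [a, b] (0 : Int) "" = a := by
        rw [show ((0 : Int)) = ((0 : Nat) : Int) by norm_num, PySem.List.pyGetD_natCast]; rfl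
      have g1 : PySem.List.pyGetD [a, b] (1 : Int) "" = b := by
        rw [show ((1 : Int)) = ((1 : Nat) : Int) by norm_num, PySem.List.pyGetD_natCast]; rfl
      rw [g0, g1]
      simp
    · rw [if_neg (by exact_mod_cast h2), if_neg h2]
      by_cases h1 : u.length = 1
      · rw [if_pos (by exact_mod_cast h1), if_pos h1]
      · rw [if_neg (by exact_mod_cast h1), if_neg h1]
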